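-- pv_equiv track=rewrite | github.com/MrBrantCode/unitest_baseline | mut_generate/mist_train_taco/taco_3153/solution.py | get_top_words_by_initial
-- ===== SOURCE A (Python) =====
-- from collections import defaultdict
--
-- def get_top_words_by_initial(sentences, initial_letter):
--     initial = defaultdict(set)
--     cnt = defaultdict(int)
--
--     for sentence in sentences:
--         words = sentence.split()
--         for word in words:
--             if word[0] == initial_letter:
--                 initial[initial_letter].add(word)
--                 cnt[word] += 1
--
--     if not initial[initial_letter]:
--         return ["NA"]
--
--     ans = list(initial[initial_letter])
--     ans.sort()
--     ans.sort(key=lambda w: cnt[w], reverse=True)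
--
--     return ans[:5]
-- ===== SOURCE B (Python) =====
-- from collections import Counter
-- import heapq
--
-- def get_top_words_by_initial(sentences, initial_letter):
--     cnt = Counter(w for s in sentences for w in s.split() if w[0] == initial_letter)
--     if not cnt:
--         return ["NA"]
--     return heapq.nlargest(5, sorted(cnt), key=cnt.__getitem__)
-- ===== Notes on version B (the rewrite author's own statement) =====
-- stated objective: alternative
-- what changed: Replaces the defaultdict(set)+dict pair built in nested loops and the full double sort by a single Counter over a generator, and selects the top 5 with heapq.nlargest over the alphabetically sorted unique words instead of a second full reverse sort.
import Mathlib
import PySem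

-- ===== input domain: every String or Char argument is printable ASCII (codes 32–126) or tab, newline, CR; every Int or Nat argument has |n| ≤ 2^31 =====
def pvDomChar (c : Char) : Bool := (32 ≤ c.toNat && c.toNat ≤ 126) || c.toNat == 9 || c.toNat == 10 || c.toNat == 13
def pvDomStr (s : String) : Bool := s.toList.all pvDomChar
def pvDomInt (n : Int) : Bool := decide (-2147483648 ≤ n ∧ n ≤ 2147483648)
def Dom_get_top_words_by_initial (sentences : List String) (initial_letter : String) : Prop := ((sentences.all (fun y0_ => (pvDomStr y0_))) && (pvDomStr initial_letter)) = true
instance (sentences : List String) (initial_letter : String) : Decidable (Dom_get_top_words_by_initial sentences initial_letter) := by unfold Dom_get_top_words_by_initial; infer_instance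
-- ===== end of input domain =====

-- B replaces A's defaultdict(set)+count-dict pair and double full sort by one Counter over a
-- filtered word stream and heapq.nlargest(5) over the alphabetically sorted unique words
-- (same results; an alternative single-structure formulation).


-- ===== PORT A =====
-- word[0] on a word produced by str.split() is always defined (split() yields no empty
-- pieces), so comparing the Option-valued pyGet? against `some initial_letter` is exact:
-- the none case is unreachable.
def get_top_words_by_initial (sentences : List String) (initial_letter : String) : List String :=
  let st := sentences.foldl
    (fun st sentence =>
      (PySem.Str.split₀ sentence).foldl
        (fun (st : PySem.Dict String (PySem.Set String) × PySem.Dict String Int) word =>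
          if ((PySem.Str.pyGet? word 0).map (fun c => String.ofList [c]) == some initial_letter) then
            (PySem.Dict.modify st.1 initial_letter PySem.Set.empty (fun s => PySem.Set.add s word),
             PySem.Dict.modify st.2 word 0 (· + 1))
          else st)
        st)
    (PySem.Dict.empty, PySem.Dict.empty)
  if (PySem.Dict.getD st.1 initial_letter PySem.Set.empty).isEmpty then ["NA"]
  else
    let ans := PySem.List.sorted (PySem.Dict.getD st.1 initial_letter PySem.Set.empty) (fun w => w)
    let ans2 := PySem.List.sorted ans (fun w => PySem.Dict.getD st.2 w 0) true
    PySem.List.slice ans2 none (some 5)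

-- ===== PORT B =====
-- heapq.nlargest(n, xs, key) is documented as sorted(xs, key=key, reverse=True)[:n];
-- it is ported as that contract (reverse sort is stable, like the heap selection).
def get_top_words_by_initial_alt (sentences : List String) (initial_letter : String) : List String :=
  let cnt := PySem.Dict.counter
    ((sentences.flatMap (fun s => PySem.Str.split₀ s)).filter
      (fun w => (PySem.Str.pyGet? w 0).map (fun c => String.ofList [c]) == some initial_letter))
  if PySem.Dict.size cnt = 0 then ["NA"]
  else
    (PySem.List.sorted (PySem.List.sorted (PySem.Dict.keys cnt) (fun w => w))
      (fun w => PySem.Dict.getD cnt w 0) true).take 5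

-- ===== PRECONDITION & SPEC =====
def Spec_get_top_words_by_initial (sentences : List String) (initial_letter : String) (out : List String) : Prop := out = get_top_words_by_initial_alt sentences initial_letter
instance (sentences : List String) (initial_letter : String) (out : List String) : Decidable (Spec_get_top_words_by_initial sentences initial_letter out) := by unfold Spec_get_top_words_by_initial; infer_instance

-- ===== CLAIM (what is proved, stated in full; the proofs are below) =====
def Claim_equal_get_top_words_by_initial : Prop := ∀ (sentences : List String) (initial_letter : String), Dom_get_top_words_by_initial sentences initial_letter → Spec_get_top_words_by_initial sentences initial_letter (get_top_words_by_initial sentences initial_letter)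

-- ===== LEMMAS AND PROOFS =====

-- A's nested loop over sentences/words is the loop over the flattened word stream.
theorem pv_foldl_flat {σ : Type} (step : σ → String → σ) (l : List String) (st : σ) :
    l.foldl (fun st s => (PySem.Str.split₀ s).foldl step st) st
      = (l.flatMap (fun s => PySem.Str.split₀ s)).foldl step st := by
  induction l generalizing st with
  | nil => rfl
  | cons s t ih => simp [List.foldl_append, ih]

-- folding `initial[k].add(word)` reads back as folding Set.add at key k
theorem pv_getD_fold_set (k : String) (l : List String)
    (d : PySem.Dict String (PySem.Set String)) :
    (l.foldl (fun d w => PySem.Dict.modify d k PySem.Set.empty (fun s => PySem.Set.add s w)) d).getD k PySem.Set.empty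
      = l.foldl PySem.Set.add (d.getD k PySem.Set.empty) := by
  induction l generalizing d with
  | nil => rfl
  | cons w t ih =>
    simpa [PySem.Dict.getD_modify_self] using
      ih (PySem.Dict.modify d k PySem.Set.empty (fun s => PySem.Set.add s w))

theorem pv_foldl_pair (il : String) (l : List String) :
    l.foldl (fun (st : PySem.Dict String (PySem.Set String) × PySem.Dict String Int) word =>
        (PySem.Dict.modify st.1 il PySem.Set.empty (fun s => PySem.Set.add s word),
         PySem.Dict.modify st.2 word 0 (· + 1))) (PySem.Dict.empty, PySem.Dict.empty)
      = (l.foldl (fun d w => PySem.Dict.modify d il PySem.Set.empty (fun s => PySem.Set.add s w)) PySem.Dict.empty,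
         l.foldl (fun d w => PySem.Dict.modify d w 0 (· + 1)) PySem.Dict.empty) :=
  PySem.List.foldl_prod_mk
    (fun d w => PySem.Dict.modify d il PySem.Set.empty (fun s => PySem.Set.add s w))
    (fun d w => PySem.Dict.modify d w 0 (· + 1)) l PySem.Dict.empty PySem.Dict.empty

theorem pv_main (sentences : List String) (initial_letter : String) :
    get_top_words_by_initial sentences initial_letter
      = get_top_words_by_initial_alt sentences initial_letter := by
  unfold get_top_words_by_initial get_top_words_by_initial_alt
  simp only [pv_foldl_flat]
  rw [← List.foldl_filter, pv_foldl_pair initial_letter]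
  dsimp only
  set wsf := (sentences.flatMap (fun s => PySem.Str.split₀ s)).filter
      (fun w => (PySem.Str.pyGet? w 0).map (fun c => String.ofList [c]) == some initial_letter) with hwsf
  have hset : (wsf.foldl (fun d w => PySem.Dict.modify d initial_letter PySem.Set.empty
        (fun s => PySem.Set.add s w)) PySem.Dict.empty).getD initial_letter PySem.Set.empty
      = PySem.Set.ofList wsf := by
    rw [pv_getD_fold_set]
    simp [← PySem.Set.ofList_eq_foldl]
  have hcnt : (fun w => (wsf.foldl (fun d w => PySem.Dict.modify d w 0 (· + 1)) PySem.Dict.empty).getD w 0)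
      = (fun w => (PySem.Dict.counter wsf).getD w 0) := by
    funext w
    rw [PySem.Dict.getD_foldl_modify_add_one, PySem.Dict.getD_counter]
    simp
  have hkeys : PySem.Dict.keys (PySem.Dict.counter wsf) = PySem.Set.ofList wsf :=
    PySem.Dict.keys_counter wsf
  have hsize : (PySem.Dict.size (PySem.Dict.counter wsf) = 0) ↔ (PySem.Set.ofList wsf).isEmpty := by
    have h := congrArg List.length hkeys
    simp only [PySem.Dict.keys, List.length_map] at h
    simp [PySem.Dict.size, h, List.isEmpty_iff, List.length_eq_zero_iff]
  rw [hset, hcnt, hkeys]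
  by_cases hc : (PySem.Set.ofList wsf).isEmpty
  · rw [if_pos hc, if_pos (hsize.mpr hc)]
  · rw [if_neg hc, if_neg (fun h => hc (hsize.mp h))]
    rw [PySem.List.slice_to _ (by norm_num : (0:Int) ≤ 5)]
    congr 1

-- ===== VERDICT (by name: the statement is the Claim_ definition above) =====
theorem get_top_words_by_initial_spec : Claim_equal_get_top_words_by_initial := by
  intro sentences initial_letter _
  unfold Spec_get_top_words_by_initial
  exact pv_main sentences initial_letter
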